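-- pv_equiv track=rewrite | github.com/ymlsmile/icme1 | aaa.py | simplyfy
-- ===== SOURCE A (Python) =====
-- def simplyfy(tours):
--     simple_tours = []
--     for tour in tours:
--         l = len(tour)
--         okay = True
--
--         for i in range(l):
--             n = tour[i]
--             if n in tour[i+1:]:
--                 if i==0 and n not in tour[i+1:-1]:
--                     pass
--                 else:
--                     okay = False
--         if okay:
--             simple_tours.append(tour)
--
--     return simple_tours
-- ===== SOURCE B (Python) =====
-- def simplyfy(tours):
--     simple_tours = []
--     for tour in tours:
--         counts = {}
--         for x in tour[1:]:
--             counts[x] = counts.get(x, 0) + 1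
--         if all(v == 1 for v in counts.values()) and (
--             not tour or counts.get(tour[0], 0) == 0 or tour[-1] == tour[0]
--         ):
--             simple_tours.append(tour)
--     return simple_tours
-- ===== Notes on version B (the rewrite author's own statement) =====
-- stated objective: faster
-- what changed: A's interleaved index loop with quadratic slice-membership scans and an i==0 special branch is replaced by building a per-tour occurrence counter (dict) in one pass and then checking that every count is 1 and that the head either does not occur in the tail or reappears only as the last element.
import Mathlib
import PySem

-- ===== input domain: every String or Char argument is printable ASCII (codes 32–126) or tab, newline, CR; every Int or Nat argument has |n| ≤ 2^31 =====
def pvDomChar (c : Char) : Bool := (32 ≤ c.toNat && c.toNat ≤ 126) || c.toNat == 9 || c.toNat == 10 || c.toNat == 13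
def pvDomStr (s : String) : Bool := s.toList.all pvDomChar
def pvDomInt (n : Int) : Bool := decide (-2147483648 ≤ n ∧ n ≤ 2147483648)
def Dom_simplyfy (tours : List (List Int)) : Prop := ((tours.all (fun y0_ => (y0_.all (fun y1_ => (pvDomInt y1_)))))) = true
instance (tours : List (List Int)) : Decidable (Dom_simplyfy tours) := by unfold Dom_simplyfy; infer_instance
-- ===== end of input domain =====

-- One honest line: B replaces A's nested slice-membership scans by a per-tour occurrence
-- counter (a dict built in one pass) checked afterwards — a different data structure,
-- O(total length) dict operations per tour instead of A's quadratic inner scans.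

-- ===== PORT A =====
-- inner loop of A: for i in range(l): n = tour[i]; if n in tour[i+1:]: if i==0 and n not in tour[i+1:-1]: pass else: okay = False
-- (tour[i] is always in range since i in range(len(tour)); pyGetD's default is never used)
def simplyfyOk (tour : List Int) : Bool :=
  (PySem.List.pyRange 0 (tour.length : Int) 1).foldl
    (fun okay i =>
      let n := PySem.List.pyGetD tour i 0
      if (PySem.List.slice tour (some (i + 1)) none).contains n then
        if i == 0 && !((PySem.List.slice tour (some (i + 1)) (some (-1))).contains n) then
          okay
        else
          false
      else okay)
    true

def simplyfy (tours : List (List Int)) : List (List Int) :=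
  tours.foldl (fun acc tour => if simplyfyOk tour then acc ++ [tour] else acc) []

-- ===== PORT B =====
-- counts = {}; for x in tour[1:]: counts[x] = counts.get(x, 0) + 1
-- keep iff all(v == 1 for v in counts.values()) and (not tour or counts.get(tour[0],0) == 0 or tour[-1] == tour[0])
-- (tour[0]/tour[-1] are guarded by 'not tour', so pyGetD's default is never used)
def simplyfyKeep (tour : List Int) : Bool :=
  let counts := (PySem.List.slice tour (some 1) none).foldl
    (fun d x => d.modify x 0 (· + 1)) PySem.Dict.empty
  counts.values.all (fun v => v == (1 : Int)) &&
    (tour.isEmpty || counts.getD (PySem.List.pyGetD tour 0 0) 0 == 0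
      || PySem.List.pyGetD tour (-1) 0 == PySem.List.pyGetD tour 0 0)

def simplyfy_alt (tours : List (List Int)) : List (List Int) :=
  tours.foldl (fun acc tour => if simplyfyKeep tour then acc ++ [tour] else acc) []

-- ===== PRECONDITION & SPEC =====
def Spec_simplyfy (tours : List (List Int)) (out : List (List Int)) : Prop := out = simplyfy_alt tours
instance (tours : List (List Int)) (out : List (List Int)) : Decidable (Spec_simplyfy tours out) := by unfold Spec_simplyfy; infer_instance

-- ===== CLAIM (what is proved, stated in full; the proofs are below) =====
def Claim_equal_simplyfy : Prop := ∀ (tours : List (List Int)), Dom_simplyfy tours → Spec_simplyfy tours (simplyfy tours)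

-- ===== LEMMAS AND PROOFS =====

-- proof-side helpers: the two conjuncts A's loop amounts to
def pvRestDistinct (rest : List Int) : Bool :=
  (PySem.List.pyRange 0 (rest.length : Int) 1).all
    (fun i => !((PySem.List.slice rest (some (i + 1)) none).contains (PySem.List.pyGetD rest i 0)))

def pvHeadOk (tour : List Int) : Bool :=
  tour.isEmpty || !((PySem.List.slice tour (some 1) (some (-1))).contains (PySem.List.pyGetD tour 0 0))

-- A's inner fold is an 'all' over the index range
theorem simplyfyOk_fold (tour L : List Int) (b : Bool) :
    L.foldl
      (fun okay i =>
        let n := PySem.List.pyGetD tour i 0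
        if (PySem.List.slice tour (some (i + 1)) none).contains n then
          if i == 0 && !((PySem.List.slice tour (some (i + 1)) (some (-1))).contains n) then
            okay
          else
            false
        else okay)
      b
    = (b && L.all (fun i =>
        !((PySem.List.slice tour (some (i + 1)) none).contains (PySem.List.pyGetD tour i 0))
        || (i == 0 && !((PySem.List.slice tour (some (i + 1)) (some (-1))).contains (PySem.List.pyGetD tour i 0))))) := by
  induction L generalizing b with
  | nil => simp
  | cons x xs ih =>
    simp only [List.foldl_cons, List.all_cons, ih]
    by_cases h1 : PySem.List.pyGetD tour x 0 ∈ PySem.List.slice tour (some (x + 1)) none <;>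
      by_cases hx : x = 0 <;>
      by_cases h2 : PySem.List.pyGetD tour x 0 ∈ PySem.List.slice tour (some (x + 1)) (some (-1)) <;>
      cases b <;>
      simp [h1, hx, h2]

-- tour[1:-1] on a cons is the interior of the tail
theorem slice_one_neg_one (x : Int) (t : List Int) :
    PySem.List.slice (x :: t) (some 1) (some (-1)) = t.take (t.length - 1) := by
  simp [PySem.List.slice]

-- per-tour agreement of A's flag with the two conjuncts
theorem ok_eq (tour : List Int) :
    simplyfyOk tour
      = (pvRestDistinct (PySem.List.slice tour (some 1) none) && pvHeadOk tour) := by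
  cases tour with
  | nil => decide
  | cons x t =>
    rw [PySem.List.slice_from_one]
    show simplyfyOk (x :: t) = (pvRestDistinct t && pvHeadOk (x :: t))
    unfold simplyfyOk pvRestDistinct pvHeadOk
    rw [simplyfyOk_fold, Bool.true_and]
    rw [show ((x :: t).length : Int) = ((t.length + 1 : Nat) : Int) by simp,
        PySem.List.pyRange_zero_nat, PySem.List.pyRange_zero_nat,
        List.range_succ_eq_map]
    simp only [List.all_cons, List.map_cons, List.map_map, List.all_map]
    rw [slice_one_neg_one]
    have hhead :
        (!((PySem.List.slice (x :: t) (some ((0:Int) + 1)) none).contains (PySem.List.pyGetD (x :: t) 0 0))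
          || (((0:Int) == 0) && !((PySem.List.slice (x :: t) (some ((0:Int) + 1)) (some (-1))).contains (PySem.List.pyGetD (x :: t) 0 0))))
        = ((x :: t).isEmpty || !((t.take (t.length - 1)).contains (PySem.List.pyGetD (x :: t) 0 0))) := by
      have e1 : ((0:Int) + 1) = 1 := by norm_num
      have h0 : PySem.List.slice (x :: t) (some (1:Int)) none = t := by
        rw [PySem.List.slice_from_one]; rfl
      rw [e1, slice_one_neg_one, h0]
      have hg : PySem.List.pyGetD (x :: t) 0 0 = x := by
        rw [show (0:Int) = ((0:Nat):Int) by norm_num, PySem.List.pyGetD_natCast]; rfl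
      rw [hg]
      by_cases hm : x ∈ List.take (t.length - 1) t
      · have hx : x ∈ t := List.mem_of_mem_take hm
        simp [hm, hx]
      · simp [hm]
    have htail : ∀ k : Nat,
        ((fun i : Int =>
            !((PySem.List.slice (x :: t) (some (i + 1)) none).contains (PySem.List.pyGetD (x :: t) i 0))
            || ((i == 0) && !((PySem.List.slice (x :: t) (some (i + 1)) (some (-1))).contains (PySem.List.pyGetD (x :: t) i 0))))
          ((k.succ : Nat) : Int))
        = (fun i : Int =>
            !((PySem.List.slice t (some (i + 1)) none).contains (PySem.List.pyGetD t i 0))) ((k : Nat) : Int) := by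
      intro k
      have hz : (((k.succ : Nat) : Int) == 0) = false := by
        exact beq_eq_false_iff_ne.mpr (by omega)
      have hget : PySem.List.pyGetD (x :: t) ((k.succ : Nat) : Int) 0 = PySem.List.pyGetD t ((k : Nat) : Int) 0 := by
        rw [PySem.List.pyGetD_natCast, PySem.List.pyGetD_natCast]; rfl
      have hsl : PySem.List.slice (x :: t) (some (((k.succ : Nat) : Int) + 1)) none
          = PySem.List.slice t (some (((k : Nat) : Int) + 1)) none := by
        rw [PySem.List.slice_from _ (by positivity), PySem.List.slice_from _ (by positivity)]
        have h1 : (((k.succ : Nat) : Int) + 1).toNat = k + 2 := by omega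
        have h2 : (((k : Nat) : Int) + 1).toNat = k + 1 := by omega
        rw [h1, h2]
        rfl
      simp only [hz, Bool.false_and, Bool.or_false, hget, hsl]
    simp only [Nat.cast_zero]
    rw [hhead, Bool.and_comm]
    congr 1
    exact List.all_congr rfl (fun k => htail k)

-- pvRestDistinct on a cons peels off one membership test
theorem restDistinct_cons (a : Int) (t : List Int) :
    pvRestDistinct (a :: t) = (!t.contains a && pvRestDistinct t) := by
  unfold pvRestDistinct
  rw [show ((a :: t).length : Int) = ((t.length + 1 : Nat) : Int) by simp,
      PySem.List.pyRange_zero_nat, PySem.List.pyRange_zero_nat, List.range_succ_eq_map]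
  simp only [List.all_cons, List.map_cons, List.map_map, List.all_map, Nat.cast_zero]
  have hhead : (!((PySem.List.slice (a :: t) (some ((0:Int) + 1)) none).contains (PySem.List.pyGetD (a :: t) 0 0))) = !t.contains a := by
    have e1 : ((0:Int) + 1) = 1 := by norm_num
    have h0 : PySem.List.slice (a :: t) (some (1:Int)) none = t := by
      rw [PySem.List.slice_from_one]; rfl
    have hg : PySem.List.pyGetD (a :: t) 0 0 = a := by
      rw [show (0:Int) = ((0:Nat):Int) by norm_num, PySem.List.pyGetD_natCast]; rfl
    rw [e1, h0, hg]
  have htail : ∀ k : Nat, ((fun i : Int => !((PySem.List.slice (a :: t) (some (i+1)) none).contains (PySem.List.pyGetD (a :: t) i 0))) ((k.succ:Nat):Int))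
      = ((fun i : Int => !((PySem.List.slice t (some (i+1)) none).contains (PySem.List.pyGetD t i 0))) ((k:Nat):Int)) := by
    intro k
    have hget : PySem.List.pyGetD (a :: t) ((k.succ : Nat) : Int) 0 = PySem.List.pyGetD t ((k : Nat) : Int) 0 := by
      rw [PySem.List.pyGetD_natCast, PySem.List.pyGetD_natCast]; rfl
    have hsl : PySem.List.slice (a :: t) (some (((k.succ : Nat) : Int) + 1)) none
        = PySem.List.slice t (some (((k : Nat) : Int) + 1)) none := by
      rw [PySem.List.slice_from _ (by positivity), PySem.List.slice_from _ (by positivity)]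
      have h1 : (((k.succ : Nat) : Int) + 1).toNat = k + 2 := by omega
      have h2 : (((k : Nat) : Int) + 1).toNat = k + 1 := by omega
      rw [h1, h2]; rfl
    simp only [hget, hsl]
  rw [hhead]
  congr 1
  exact List.all_congr rfl (fun k => htail k)
-- pvRestDistinct is exactly Nodup
theorem restDistinct_eq_nodup (t : List Int) : pvRestDistinct t = decide t.Nodup := by
  induction t with
  | nil => decide
  | cons a t ih =>
    rw [restDistinct_cons, ih]
    by_cases h1 : a ∈ t <;> by_cases h2 : t.Nodup <;> simp [h1, h2, List.nodup_cons]
-- the counter's values are all 1 exactly when the list has no duplicates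
theorem counter_values_all_one (t : List Int) :
    ((PySem.Dict.counter t).values.all (fun v => v == (1 : Int))) = decide t.Nodup := by
  have hv : (PySem.Dict.counter t).values
      = ((PySem.Set.ofList t : List Int).map (fun k => ((t.count k : Int)))) := by
    show (PySem.Dict.counter t).items.map (·.2) = _
    rw [PySem.Dict.items_counter]
    simp [List.map_map]
  rw [hv, List.all_map]
  by_cases h : t.Nodup
  · simp only [h, decide_true]
    rw [List.all_eq_true]
    intro k hk
    have hle := List.nodup_iff_count_le_one.mp h k
    have hpos := List.count_pos_iff.mpr ((PySem.Set.mem_ofList _ _).mp hk)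
    have h1 : t.count k = 1 := by omega
    simp [h1]
  · simp only [h, decide_false]
    rw [Bool.eq_false_iff]
    intro hall
    rw [List.all_eq_true] at hall
    apply h
    rw [List.nodup_iff_count_le_one]
    intro a
    by_cases hm : a ∈ t
    · have hb := hall a ((PySem.Set.mem_ofList _ _).mpr hm)
      have h1 : t.count a = 1 := by simpa using hb
      omega
    · simp [List.count_eq_zero_of_not_mem hm]

theorem mem_dropLast_char (u : List Int) (x : Int) (hne : u ≠ []) (h : u.Nodup) :
    (x ∉ u.dropLast) ↔ (u.count x = 0 ∨ u.getLast hne = x) := by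
  rcases List.eq_nil_or_concat u with rfl | ⟨init, last, hu⟩
  · exact absurd rfl hne
  · rw [List.concat_eq_append] at hu
    subst hu
    rw [List.dropLast_concat]
    have hlast : (init ++ [last]).getLast hne = last := by
      simp
    rw [hlast]
    have hni : last ∉ init := by
      have h2 := h
      rw [List.nodup_append] at h2
      rcases h2 with ⟨_, _, hdisj⟩
      intro hm
      exact (hdisj last hm last (List.mem_singleton_self last)) rfl
    constructor
    · intro hx
      by_cases hl : last = x
      · exact Or.inr hl
      · refine Or.inl (List.count_eq_zero_of_not_mem ?_)
        intro hm
        rcases List.mem_append.mp hm with h1 | h1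
        · exact hx h1
        · exact hl (List.mem_singleton.mp h1).symm
    · rintro (hc | rfl)
      · intro hm
        exact (List.count_eq_zero.mp hc) (List.mem_append_left _ hm)
      · exact hni

theorem head_eq (x : Int) (t : List Int) (h : t.Nodup) :
    pvHeadOk (x :: t)
      = (((t.count x : Int) == 0) || (PySem.List.pyGetD (x :: t) (-1) 0 == x)) := by
  unfold pvHeadOk
  rw [slice_one_neg_one, PySem.List.pyGetD_zero_cons]
  cases t with
  | nil =>
    have hg : PySem.List.pyGetD [x] (-1) 0 = x := by
      simp [PySem.List.pyGetD, PySem.List.pyGet?_neg_one]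
    simp [hg]
  | cons b t' =>
    rw [PySem.List.pyGetD_neg_one (h := by simp)]
    rw [show (b :: t').take ((b :: t').length - 1) = (b :: t').dropLast from ((b :: t').dropLast_eq_take).symm]
    have hlast : (x :: b :: t').getLast (by simp) = (b :: t').getLast (by simp) := by
      simp [List.getLast_cons]
    rw [hlast, Bool.eq_iff_iff]
    simp only [List.isEmpty_cons, Bool.false_or, Bool.or_eq_true, Bool.not_eq_true',
      beq_iff_eq, List.contains_eq_mem, decide_eq_false_iff_not, Int.natCast_eq_zero]
    exact mem_dropLast_char (b :: t') x (by simp) h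
-- per-tour agreement of the two keep predicates
theorem keep_eq (tour : List Int) : simplyfyOk tour = simplyfyKeep tour := by
  rw [ok_eq]
  cases tour with
  | nil =>
    show (pvRestDistinct (PySem.List.slice [] (some 1) none) && pvHeadOk []) = simplyfyKeep []
    decide
  | cons x t =>
    simp only [simplyfyKeep, PySem.List.slice_from_one, List.tail_cons, List.isEmpty_cons,
      PySem.List.pyGetD_zero_cons, Bool.false_or]
    have hc : (List.foldl (fun d x => PySem.Dict.modify d x 0 (· + 1)) PySem.Dict.empty t)
        = PySem.Dict.counter t := rfl
    rw [hc, counter_values_all_one, restDistinct_eq_nodup, PySem.Dict.getD_counter]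
    by_cases h : t.Nodup
    · simp only [h, decide_true, Bool.true_and]
      exact head_eq x t h
    · simp [h]
-- ===== VERDICT (by name: the statement is the Claim_ definition above) =====
theorem simplyfy_spec : Claim_equal_simplyfy := by
  intro tours _
  unfold Spec_simplyfy simplyfy simplyfy_alt
  rw [PySem.List.foldl_append_if_eq_filter, PySem.List.foldl_append_if_eq_filter,
      List.nil_append, List.nil_append]
  exact List.filter_congr (fun tour _ => keep_eq tour)
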